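-- pv_equiv track=rewrite | github.com/ehdgua01/Algorithms | coding_test/programmers/stack_queue/pipe/pipe.py | solution
-- ===== SOURCE A (Python) =====
-- def solution(arrangement: str) -> int:
--     answer: int = 0
--     pipes: int = 0
--     is_laser: bool = False
--
--     for a in arrangement:
--         if a == ")":
--             if is_laser:
--                 answer += pipes - 1
--                 is_laser = False
--             else:
--                 answer += 1
--             pipes -= 1
--         else:
--             pipes += 1
--             is_laser = True
--     return answer
-- ===== SOURCE B (Python) =====
-- def solution(arrangement: str) -> int:
--     # canonicalize (every non-')' opens a pipe, as in the original), collapse lasers "()" into '|'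
--     s = ''.join(')' if c == ')' else '(' for c in arrangement).replace('()', '|')
--     answer = 0
--     depth = 0
--     for c in s:
--         if c == '(':
--             depth += 1
--         elif c == '|':
--             answer += depth
--         else:
--             depth -= 1
--             answer += 1
--     return answer
-- ===== Notes on version B (the rewrite author's own statement) =====
-- stated objective: idiomatic
-- what changed: B replaces A's per-character is_laser state machine by a preprocess-then-scan decomposition: canonicalize every non-')' to '(', collapse laser pairs with replace('()', '|'), then one simple pass where '(' raises depth, '|' adds the current depth and ')' adds one piece.
import Mathlib
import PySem

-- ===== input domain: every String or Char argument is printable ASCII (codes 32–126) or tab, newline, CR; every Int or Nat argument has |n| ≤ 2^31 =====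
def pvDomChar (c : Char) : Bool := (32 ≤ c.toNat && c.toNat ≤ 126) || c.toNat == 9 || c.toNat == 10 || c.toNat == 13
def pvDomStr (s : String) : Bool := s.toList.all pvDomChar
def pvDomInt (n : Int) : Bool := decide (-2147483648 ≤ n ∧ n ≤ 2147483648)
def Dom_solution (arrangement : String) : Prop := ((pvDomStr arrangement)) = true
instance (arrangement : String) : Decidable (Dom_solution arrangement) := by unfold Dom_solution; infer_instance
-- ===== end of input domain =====

-- B canonicalizes the string ("non-')' opens a pipe", as A treats it), collapses laser pairs
-- with replace('()', '|') and does one simple depth pass — same value, plainer control flow (objective: idiomatic).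

-- ===== PORT A =====
-- state = (answer, pipes, is_laser), exactly A's three variables
def stepA (st : Int × Int × Bool) (a : Char) : Int × Int × Bool :=
  if a = ')' then
    if st.2.2 then (st.1 + st.2.1 - 1, st.2.1 - 1, false)
    else (st.1 + 1, st.2.1 - 1, st.2.2)
  else (st.1, st.2.1 + 1, true)

def solution (arrangement : String) : Int :=
  (arrangement.toList.foldl stepA (0, 0, false)).1

-- ===== PORT B =====
def canonB (c : Char) : Char := if c = ')' then ')' else '('

-- state = (answer, depth)
def stepB (st : Int × Int) (c : Char) : Int × Int :=
  if c = '(' then (st.1, st.2 + 1)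
  else if c = '|' then (st.1 + st.2, st.2)
  else (st.1 + 1, st.2 - 1)

def solution_alt (arrangement : String) : Int :=
  let s : List Char := PySem.Chars.replace (arrangement.toList.map canonB) ['(', ')'] ['|']
  (s.foldl stepB (0, 0)).1

-- ===== PRECONDITION & SPEC =====
def Spec_solution (arrangement : String) (out : Int) : Prop := out = solution_alt arrangement
instance (arrangement : String) (out : Int) : Decidable (Spec_solution arrangement out) := by unfold Spec_solution; infer_instance

-- ===== CLAIM (what is proved, stated in full; the proofs are below) =====
def Claim_equal_solution : Prop := ∀ (arrangement : String), Dom_solution arrangement → Spec_solution arrangement (solution arrangement)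

-- ===== LEMMAS AND PROOFS =====

-- reference form of replace('()', '|') on a canonical string
def repl : List Char → List Char
  | [] => []
  | [c] => [c]
  | c :: d :: t => if c = '(' ∧ d = ')' then '|' :: repl t else c :: repl (d :: t)

-- Chars.replace.go with pattern "()" computes repl (fuel ≥ length)
theorem go_eq_repl : ∀ (fuel : Nat) (l acc : List Char), l.length ≤ fuel →
    PySem.Chars.replace.go ['(', ')'] ['|'] fuel l acc = acc.reverse ++ repl l := by
  intro fuel
  induction fuel with
  | zero =>
    intro l acc h
    have : l = [] := List.eq_nil_of_length_eq_zero (Nat.le_zero.mp h)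
    subst this
    simp [PySem.Chars.replace.go, repl]
  | succ n ih =>
    intro l acc h
    match l with
    | [] => simp [PySem.Chars.replace.go, repl]
    | [c] =>
      simp [PySem.Chars.replace.go, List.isPrefixOf, ih [] (c :: acc) (by simp), repl]
    | c :: d :: t =>
      by_cases hp : c = '(' ∧ d = ')'
      · obtain ⟨hc, hd⟩ := hp
        subst hc; subst hd
        have ht : t.length ≤ n := by simp at h; omega
        simp [PySem.Chars.replace.go, List.isPrefixOf, repl, ih t ('|' :: acc) ht]
      · have hnp : (['(', ')'].isPrefixOf (c :: d :: t)) ≠ true := by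
          intro hpre
          have hpre' := List.isPrefixOf_iff_prefix.mp hpre
          simp only [List.cons_prefix_cons] at hpre'
          exact hp ⟨hpre'.1.symm, hpre'.2.1.symm⟩
        have ht : (d :: t).length ≤ n := by simp at h ⊢; omega
        rw [show PySem.Chars.replace.go ['(', ')'] ['|'] (n+1) (c :: d :: t) acc
             = PySem.Chars.replace.go ['(', ')'] ['|'] n (d :: t) (c :: acc) by
              simp [PySem.Chars.replace.go, hnp]]
        rw [ih (d :: t) (c :: acc) ht]
        simp [repl, hp]

theorem replace_eq_repl (l : List Char) :
    PySem.Chars.replace l ['(', ')'] ['|'] = repl l := by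
  have := go_eq_repl l.length l [] (le_refl _)
  simpa [PySem.Chars.replace] using this

-- A's step only looks at whether the char is ')', so canonicalizing the input is invisible to A
theorem stepA_canon (st : Int × Int × Bool) (c : Char) : stepA st (canonB c) = stepA st c := by
  by_cases hc : c = ')'
  · simp [canonB, hc]
  · simp [canonB, hc, stepA]

theorem foldA_canon (l : List Char) (st : Int × Int × Bool) :
    (l.map canonB).foldl stepA st = l.foldl stepA st := by
  induction l generalizing st with
  | nil => rfl
  | cons c t ih => simp [List.foldl_cons, stepA_canon, ih]

-- canonical characters
def isCanon (l : List Char) : Prop := ∀ c ∈ l, c = '(' ∨ c = ')'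

-- the heart: A's fold over a canonical string (flag down) = B's fold over its repl image
theorem main_lemma : ∀ (l : List Char), isCanon l → ∀ (ans p : Int),
    (l.foldl stepA (ans, p, false)).1 = ((repl l).foldl stepB (ans, p)).1 := by
  intro l
  induction l using repl.induct with
  | case1 => intro _ ans p; simp [repl]
  | case2 c =>
    intro hcan ans p
    rcases hcan c (by simp) with hc | hc <;> subst hc <;>
      simp [repl, stepA, stepB]
  | case3 c d t hp ih =>
    intro hcan ans p
    obtain ⟨hc, hd⟩ := hp
    subst hc; subst hd
    have hcan' : isCanon t := fun x hx => hcan x (by simp [hx])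
    rw [show repl ('(' :: ')' :: t) = '|' :: repl t from by simp [repl]]
    simp only [List.foldl_cons]
    rw [show stepA (ans, p, false) '(' = (ans, p + 1, true) from by simp [stepA],
        show stepA (ans, p + 1, true) ')' = (ans + (p + 1) - 1, p + 1 - 1, false) from by
          simp [stepA],
        show stepB (ans, p) '|' = (ans + p, p) from by simp [stepB]]
    have h1 : ans + (p + 1) - 1 = ans + p := by ring
    have h2 : p + 1 - 1 = p := by ring
    rw [h1, h2]
    exact ih hcan' (ans + p) p
  | case4 c d t hp ih =>
    intro hcan ans p
    have hcan' : isCanon (d :: t) := fun x hx => hcan x (by simp at hx ⊢; tauto)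
    rw [show repl (c :: d :: t) = c :: repl (d :: t) from by simp [repl, hp]]
    rcases hcan c (by simp) with hc | hc
    · -- c = '(' and d ≠ ')'; since canonical, d = '('
      subst hc
      have hd : d = '(' := by
        rcases hcan d (by simp) with h | h
        · exact h
        · exact absurd ⟨rfl, h⟩ hp
      simp only [List.foldl_cons]
      rw [show stepA (ans, p, false) '(' = (ans, p + 1, true) from by simp [stepA],
          show stepB (ans, p) '(' = (ans, p + 1) from by simp [stepB]]
      -- after the '(' step A's flag is up, but the next char is '(' which overwrites it
      subst hd
      rw [show stepA (ans, p + 1, true) '(' = stepA (ans, p + 1, false) '(' from by simp [stepA]]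
      simpa only [List.foldl_cons] using ih hcan' ans (p + 1)
    · subst hc
      simp only [List.foldl_cons]
      rw [show stepA (ans, p, false) ')' = (ans + 1, p - 1, false) from by simp [stepA],
          show stepB (ans, p) ')' = (ans + 1, p - 1) from by simp [stepB]]
      exact ih hcan' (ans + 1) (p - 1)

-- ===== VERDICT (by name: the statement is the Claim_ definition above) =====
theorem solution_spec : Claim_equal_solution := by
  unfold Claim_equal_solution
  intro arrangement _
  unfold Spec_solution solution solution_alt
  rw [replace_eq_repl]
  have hcan : isCanon (arrangement.toList.map canonB) := by
    intro c hc
    simp only [List.mem_map] at hc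
    obtain ⟨x, _, hx⟩ := hc
    subst hx
    by_cases h : x = ')' <;> simp [canonB, h]
  have := main_lemma (arrangement.toList.map canonB) hcan 0 0
  rw [foldA_canon] at this
  show (List.foldl stepA (0, 0, false) arrangement.toList).1
      = (List.foldl stepB (0, 0) (repl (List.map canonB arrangement.toList))).1
  exact this
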